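-- pv_equiv track=rewrite | github.com/ALowVerus/edx | ucsdx/_8_algos_data_structures_capstone/p1_1_genome_assembly_overlap_graph.py | sanitize_adjacency_list
-- ===== SOURCE A (Python) =====
-- def sanitize_adjacency_list(graph):
--     # Convert graph keys to integers
--     keys_to_integers = {}
--     n = 0
--     converted_graph = {}
--     for s, sub in graph.items():
--         if s not in keys_to_integers:
--             keys_to_integers[s] = n
--             n += 1
--         si = keys_to_integers[s]
--         if si not in converted_graph:
--             converted_graph[si] = {}
--         for f, v in sub.items():
--             if f not in keys_to_integers:
--                 keys_to_integers[f] = n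
--                 n += 1
--             sf = keys_to_integers[f]
--             converted_graph[si][sf] = v
--     return keys_to_integers, converted_graph
-- ===== SOURCE B (Python) =====
-- def sanitize_adjacency_list(graph):
--     # Pass 1: label every node (source first, then its targets) by first appearance.
--     order = [k for s, sub in graph.items() for k in (s, *sub)]
--     keys_to_integers = {k: i for i, k in enumerate(dict.fromkeys(order))}
--     # Pass 2: rebuild the adjacency structure by pure lookups.
--     converted_graph = {
--         keys_to_integers[s]: {keys_to_integers[f]: v for f, v in sub.items()}
--         for s, sub in graph.items()
--     }
--     return keys_to_integers, converted_graph
-- ===== Notes on version B (the rewrite author's own statement) =====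
-- stated objective: simpler
-- what changed: A assigns integer labels and builds the converted adjacency dict in one interleaved nested loop with insert-if-absent bookkeeping; B first computes the labelling alone (flatten the key stream in first-appearance order, dict.fromkeys + enumerate) and then rebuilds the adjacency mapping in a second pass by pure dict-comprehension lookups.
import Mathlib
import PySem

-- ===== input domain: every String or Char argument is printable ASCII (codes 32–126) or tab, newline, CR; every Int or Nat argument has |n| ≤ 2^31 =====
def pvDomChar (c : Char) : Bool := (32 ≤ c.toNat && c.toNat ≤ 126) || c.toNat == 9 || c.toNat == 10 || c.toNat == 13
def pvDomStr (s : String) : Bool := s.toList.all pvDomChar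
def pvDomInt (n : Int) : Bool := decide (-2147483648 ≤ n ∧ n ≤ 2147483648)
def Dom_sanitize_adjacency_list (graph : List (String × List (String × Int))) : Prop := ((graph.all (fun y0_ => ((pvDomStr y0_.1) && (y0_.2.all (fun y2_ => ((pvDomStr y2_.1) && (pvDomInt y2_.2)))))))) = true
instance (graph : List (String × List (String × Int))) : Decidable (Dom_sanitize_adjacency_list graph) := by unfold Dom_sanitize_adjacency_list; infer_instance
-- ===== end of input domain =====

-- B replaces A's single interleaved loop by two passes: label all nodes first (dedup + enumerate),
-- then rebuild the adjacency dict by pure lookups (objective: simpler decomposition, same cost).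
-- Both ports first decode the assoc-list argument into the Python dict-of-dicts it denotes
-- (duplicate keys overwrite in place, exactly as a Python dict literal would).

def pvToDict (graph : List (String × List (String × Int))) :
    PySem.Dict String (PySem.Dict String Int) :=
  PySem.Dict.ofList (graph.map (fun p => (p.1, PySem.Dict.ofList p.2)))

-- ===== PORT A =====
-- inner loop: `for f, v in sub.items(): …`
def pvAInner (si : Int) (fs : List (String × Int)) (kti : PySem.Dict String Int) (n : Int)
    (cg : PySem.Dict Int (PySem.Dict Int Int)) :
    PySem.Dict String Int × Int × PySem.Dict Int (PySem.Dict Int Int) :=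
  match fs with
  | [] => (kti, n, cg)
  | (f, v) :: rest =>
    let st := if kti.contains f then (kti, n) else (kti.insert f n, n + 1)
    -- keys_to_integers[f]: f is present here, so getD is exact (no KeyError possible)
    let sf := st.1.getD f 0
    pvAInner si rest st.1 st.2 (cg.modify si PySem.Dict.empty (fun m => m.insert sf v))

-- outer loop: `for s, sub in graph.items(): …`
def pvAOuter (items : List (String × PySem.Dict String Int)) (kti : PySem.Dict String Int)
    (n : Int) (cg : PySem.Dict Int (PySem.Dict Int Int)) :
    PySem.Dict String Int × Int × PySem.Dict Int (PySem.Dict Int Int) :=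
  match items with
  | [] => (kti, n, cg)
  | (s, sub) :: rest =>
    let st := if kti.contains s then (kti, n) else (kti.insert s n, n + 1)
    -- keys_to_integers[s]: s is present here, so getD is exact
    let si := st.1.getD s 0
    let cg1 := if cg.contains si then cg else cg.insert si PySem.Dict.empty
    let r := pvAInner si sub.items st.1 st.2 cg1
    pvAOuter rest r.1 r.2.1 r.2.2

def sanitize_adjacency_list (graph : List (String × List (String × Int))) :
    (List (String × Int)) × (List (Int × List (Int × Int))) :=
  let g := pvToDict graph
  let r := pvAOuter g.items PySem.Dict.empty 0 PySem.Dict.empty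
  (r.1.items, r.2.2.items.map (fun p => (p.1, p.2.items)))

-- ===== PORT B =====
def sanitize_adjacency_list_alt (graph : List (String × List (String × Int))) :
    (List (String × Int)) × (List (Int × List (Int × Int))) :=
  let g := pvToDict graph
  -- order = [k for s, sub in graph.items() for k in (s, *sub)]
  let order := g.items.flatMap (fun p => p.1 :: p.2.keys)
  -- keys_to_integers = {k: i for i, k in enumerate(dict.fromkeys(order))}
  let kti := PySem.Dict.ofList ((PySem.List.enumerate (PySem.List.dedup order) 0).map (fun q => (q.2, q.1)))
  -- converted_graph = {kti[s]: {kti[f]: v for f, v in sub.items()} for s, sub in graph.items()}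
  -- (every key looked up is present, so getD is exact: no KeyError possible)
  let cg := PySem.Dict.ofList (g.items.map (fun p =>
      (kti.getD p.1 0, PySem.Dict.ofList (p.2.items.map (fun q => (kti.getD q.1 0, q.2))))))
  (kti.items, cg.items.map (fun p => (p.1, p.2.items)))

-- ===== PRECONDITION & SPEC =====
def Spec_sanitize_adjacency_list (graph : List (String × List (String × Int))) (out : (List (String × Int)) × (List (Int × List (Int × Int)))) : Prop := out = sanitize_adjacency_list_alt graph
instance (graph : List (String × List (String × Int))) (out : (List (String × Int)) × (List (Int × List (Int × Int)))) : Decidable (Spec_sanitize_adjacency_list graph out) := by unfold Spec_sanitize_adjacency_list; infer_instance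

-- ===== CLAIM (what is proved, stated in full; the proofs are below) =====
def Claim_equal_sanitize_adjacency_list : Prop := ∀ (graph : List (String × List (String × Int))), Dom_sanitize_adjacency_list graph → Spec_sanitize_adjacency_list graph (sanitize_adjacency_list graph)

-- ===== LEMMAS AND PROOFS =====

-- the enumeration dict: keys S (in order), values 0,1,2,…
def pvE (S : List String) : PySem.Dict String Int :=
  ⟨(PySem.List.enumerate S 0).map (fun q => (q.2, q.1))⟩

-- the key stream of the outer loop: each source followed by its targets
def pvStream (L : List (String × PySem.Dict String Int)) : List String :=
  L.flatMap (fun p => p.1 :: p.2.keys)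

theorem pvE_get?_aux (S : List String) : ∀ (s : Int) (k : String),
    (PySem.Dict.mk ((PySem.List.enumerate S s).map (fun q => (q.2, q.1)))).get? k
      = if k ∈ S then some (s + (S.idxOf k : Int)) else none := by
  induction S with
  | nil => intro s k; simp [PySem.List.enumerate_nil, PySem.Dict.get?]
  | cons x t ih =>
    intro s k
    rw [PySem.List.enumerate_cons]
    simp only [List.map_cons, PySem.Dict.get?_mk_cons]
    by_cases hxk : x = k
    · subst hxk
      simp [List.idxOf_cons_self]
    · have hbe : (x == k) = false := by simp [hxk]
      rw [hbe]
      simp only [Bool.false_eq_true, if_false, ih (s+1) k]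
      by_cases hk : k ∈ t
      · have : k ∈ x :: t := List.mem_cons_of_mem _ hk
        rw [if_pos hk, if_pos this, List.idxOf_cons_ne _ (by simpa using hxk)]
        push_cast; ring_nf
      · rw [if_neg hk, if_neg (by simp [hk, Ne.symm hxk])]

theorem pvE_get? (S : List String) (k : String) :
    (pvE S).get? k = if k ∈ S then some ((S.idxOf k : Int)) else none := by
  have := pvE_get?_aux S 0 k
  simpa [pvE] using this

theorem pvE_getD (S : List String) (k : String) (hk : k ∈ S) :
    (pvE S).getD k 0 = (S.idxOf k : Int) := by
  rw [PySem.Dict.getD_eq_get?_getD, pvE_get?, if_pos hk]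
  rfl

theorem pvE_contains (S : List String) (k : String) :
    (pvE S).contains k = decide (k ∈ S) := by
  rw [PySem.Dict.contains_eq_isSome_get?, pvE_get?]
  by_cases hk : k ∈ S <;> simp [hk]

theorem pvE_getD_inj {S : List String} {j k : String} (hj : j ∈ S) (hk : k ∈ S)
    (h : (pvE S).getD j 0 = (pvE S).getD k 0) : j = k := by
  rw [pvE_getD S j hj, pvE_getD S k hk] at h
  exact (List.idxOf_inj hj).mp (by exact_mod_cast h)

theorem pvE_getD_prefix {S T : List String} (hpre : S <+: T) {k : String} (hk : k ∈ S) :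
    (pvE T).getD k 0 = (pvE S).getD k 0 := by
  obtain ⟨T', rfl⟩ := hpre
  rw [pvE_getD _ _ (List.mem_append_left _ hk), pvE_getD _ _ hk,
    List.idxOf_append, if_pos hk]

theorem pv_prefix_update (S : List String) (l : List String) : S <+: PySem.Set.update S l := by
  rw [PySem.Set.update_eq_append_filter]
  exact List.prefix_append _ _

theorem pvKtiStep (S : List String) (k : String) :
    (if (pvE S).contains k then (pvE S, (S.length : Int))
     else ((pvE S).insert k (S.length : Int), (S.length : Int) + 1))
      = (pvE (PySem.Set.add S k), ((PySem.Set.add S k).length : Int)) := by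
  rw [pvE_contains]
  by_cases hk : k ∈ S
  · rw [PySem.Set.add_of_mem hk]; simp [hk]
  · rw [PySem.Set.add_of_not_mem hk]
    simp only [hk, decide_false, Bool.false_eq_true, if_false]
    have hc : (pvE S).contains k = false := by rw [pvE_contains]; simp [hk]
    have hins : (pvE S).insert k (S.length : Int) = pvE (S ++ [k]) := by
      apply PySem.Dict.ext
      rw [PySem.Dict.items_insert_of_not_contains _ _ hc]
      show _ = (PySem.List.enumerate (S ++ [k]) 0).map (fun q => (q.2, q.1))
      rw [PySem.List.enumerate_append, List.map_append]
      simp [pvE, PySem.List.enumerate_cons, PySem.List.enumerate_nil]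
    rw [hins]
    simp

theorem pv_mk_contains_false {κ ν : Type} [BEq κ] [LawfulBEq κ]
    (l : List (κ × ν)) (k : κ) (h : ∀ j ∈ l.map Prod.fst, j ≠ k) :
    (PySem.Dict.mk l : PySem.Dict κ ν).contains k = false := by
  simp only [PySem.Dict.contains, List.any_eq_false]
  intro p hp
  simpa using h p.1 (List.mem_map_of_mem hp)

theorem pv_mk_getD_last {κ ν : Type} [BEq κ] [LawfulBEq κ]
    (l : List (κ × ν)) (k : κ) (m d : ν) (h : ∀ j ∈ l.map Prod.fst, j ≠ k) :
    (PySem.Dict.mk (l ++ [(k, m)]) : PySem.Dict κ ν).getD k d = m := by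
  induction l with
  | nil => simp [PySem.Dict.getD, PySem.Dict.get?]
  | cons p t ih =>
    have hp : p.1 ≠ k := h p.1 (by simp)
    rw [List.cons_append, PySem.Dict.getD_eq_get?_getD, PySem.Dict.get?_mk_cons]
    simp only [beq_eq_false_iff_ne.mpr hp, Bool.false_eq_true, if_false]
    rw [← PySem.Dict.getD_eq_get?_getD]
    exact ih (fun j hj => h j (by simp at hj ⊢; exact Or.inr hj))

theorem pv_mk_insert_last {κ ν : Type} [BEq κ] [LawfulBEq κ]
    (l : List (κ × ν)) (k : κ) (m m' : ν) (h : ∀ j ∈ l.map Prod.fst, j ≠ k) :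
    (PySem.Dict.mk (l ++ [(k, m)]) : PySem.Dict κ ν).insert k m'
      = PySem.Dict.mk (l ++ [(k, m')]) := by
  have hc : (PySem.Dict.mk (l ++ [(k, m)]) : PySem.Dict κ ν).contains k = true := by
    simp [PySem.Dict.contains]
  apply PySem.Dict.ext
  rw [PySem.Dict.items_insert_of_contains _ _ hc]
  show List.map _ (l ++ [(k, m)]) = _
  rw [List.map_append]
  congr 1
  · conv_rhs => rw [show l = l.map id by simp]
    apply List.map_congr_left
    intro p hp
    simp [beq_eq_false_iff_ne.mpr (h p.1 (List.mem_map_of_mem hp))]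
  · simp

theorem pv_ofList_eq_mk {κ ν : Type} [BEq κ] [LawfulBEq κ]
    (l : List (κ × ν)) (h : (l.map Prod.fst).Nodup) :
    PySem.Dict.ofList l = PySem.Dict.mk l := by
  apply PySem.Dict.ext
  show (List.foldl (fun acc p => acc.insert p.1 p.2) PySem.Dict.empty l).items = l
  rw [PySem.Dict.items_foldl_insert_fresh l Prod.fst Prod.snd PySem.Dict.empty
    (fun a _ => PySem.Dict.contains_empty _) h]
  show PySem.Dict.empty.items ++ _ = l
  rw [show (PySem.Dict.empty : PySem.Dict κ ν).items = [] from rfl]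
  simp

theorem pvInner_spec (D : List String) :
    ∀ (fs : List (String × Int)) (S : List String) (si : Int) (m : PySem.Dict Int Int)
      (cgl : List (Int × PySem.Dict Int Int)),
      S.Nodup → (PySem.Set.update S (fs.map Prod.fst)) <+: D →
      (∀ j ∈ cgl.map Prod.fst, j ≠ si) →
      pvAInner si fs (pvE S) (S.length : Int) ⟨cgl ++ [(si, m)]⟩
        = (pvE (PySem.Set.update S (fs.map Prod.fst)),
           ((PySem.Set.update S (fs.map Prod.fst)).length : Int),
           ⟨cgl ++ [(si, fs.foldl (fun m q => m.insert ((pvE D).getD q.1 0) q.2) m)]⟩) := by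
  intro fs
  induction fs with
  | nil =>
    intro S si m cgl hS hpre hcg
    simp only [pvAInner, List.map_nil, List.foldl_nil]
    rfl
  | cons fv rest ih =>
    obtain ⟨f, v⟩ := fv
    intro S si m cgl hS hpre hcg
    rw [List.map_cons, PySem.Set.update_cons] at hpre
    have hpre1 : PySem.Set.add S f <+: D :=
      (pv_prefix_update (PySem.Set.add S f) (rest.map Prod.fst)).trans hpre
    have hmem : f ∈ PySem.Set.add S f := (PySem.Set.mem_add S f f).mpr (Or.inr rfl)
    have hsf : (pvE (PySem.Set.add S f)).getD f 0 = (pvE D).getD f 0 :=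
      (pvE_getD_prefix hpre1 hmem).symm
    show pvAInner si ((f, v) :: rest) (pvE S) (S.length : Int) ⟨cgl ++ [(si, m)]⟩ = _
    rw [pvAInner, pvKtiStep S f]
    simp only
    rw [PySem.Dict.modify, pv_mk_getD_last _ _ _ _ hcg, pv_mk_insert_last _ _ _ _ hcg, hsf]
    rw [ih (PySem.Set.add S f) si (m.insert ((pvE D).getD f 0) v) cgl
      (PySem.Set.nodup_add S f hS) hpre hcg]
    rw [List.map_cons, PySem.Set.update_cons, List.foldl_cons]

theorem pvOuter_spec (D : List String) (hD : D.Nodup) :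
    ∀ (L : List (String × PySem.Dict String Int)) (S : List String)
      (cgl : List (Int × PySem.Dict Int Int)),
      S.Nodup →
      PySem.Set.update S (pvStream L) = D →
      (L.map Prod.fst).Nodup →
      (∀ p ∈ L, ∀ j ∈ cgl.map Prod.fst, j ≠ (pvE D).getD p.1 0) →
      pvAOuter L (pvE S) (S.length : Int) ⟨cgl⟩
        = (pvE D, (D.length : Int),
           ⟨cgl ++ L.map (fun p => ((pvE D).getD p.1 0,
              PySem.Dict.ofList (p.2.items.map (fun q => ((pvE D).getD q.1 0, q.2)))))⟩) := by
  intro L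
  induction L with
  | nil =>
    intro S cgl hS hD2 hsrc hcg
    have hSD : S = D := by simpa [pvStream, PySem.Set.update] using hD2
    subst hSD
    simp [pvAOuter]
  | cons p rest ih =>
    obtain ⟨s, sub⟩ := p
    intro S cgl hS hD2 hsrc hcg
    have hstream : pvStream ((s, sub) :: rest) = s :: (sub.keys ++ pvStream rest) := by
      simp [pvStream]
    rw [hstream, PySem.Set.update_cons, PySem.Set.update_append] at hD2
    have hkeys : sub.items.map Prod.fst = sub.keys := rfl
    have hS1 : (PySem.Set.add S s).Nodup := PySem.Set.nodup_add S s hS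
    have hS2 : (PySem.Set.update (PySem.Set.add S s) sub.keys).Nodup :=
      PySem.Set.nodup_update _ _ hS1
    have hpre2 : PySem.Set.update (PySem.Set.add S s) sub.keys <+: D :=
      hD2 ▸ pv_prefix_update _ (pvStream rest)
    have hpre1 : PySem.Set.add S s <+: D :=
      (pv_prefix_update _ sub.keys).trans hpre2
    have hmem_s : s ∈ PySem.Set.add S s := (PySem.Set.mem_add S s s).mpr (Or.inr rfl)
    have hsi : (pvE (PySem.Set.add S s)).getD s 0 = (pvE D).getD s 0 :=
      (pvE_getD_prefix hpre1 hmem_s).symm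
    have hcg_head : ∀ j ∈ cgl.map Prod.fst, j ≠ (pvE D).getD s 0 :=
      hcg (s, sub) (List.mem_cons_self)
    show pvAOuter ((s, sub) :: rest) (pvE S) (S.length : Int) ⟨cgl⟩ = _
    rw [pvAOuter, pvKtiStep S s]
    simp only
    rw [hsi]
    have hcont : (PySem.Dict.mk cgl : PySem.Dict Int (PySem.Dict Int Int)).contains
        ((pvE D).getD s 0) = false := pv_mk_contains_false cgl _ hcg_head
    rw [hcont]
    simp only [Bool.false_eq_true, if_false]
    have hins : (PySem.Dict.mk cgl : PySem.Dict Int (PySem.Dict Int Int)).insert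
        ((pvE D).getD s 0) PySem.Dict.empty = ⟨cgl ++ [((pvE D).getD s 0, PySem.Dict.empty)]⟩ :=
      PySem.Dict.ext (PySem.Dict.items_insert_of_not_contains _ _ hcont)
    rw [hins]
    rw [pvInner_spec D sub.items (PySem.Set.add S s) ((pvE D).getD s 0) PySem.Dict.empty cgl
      hS1 (by rw [hkeys]; exact hpre2) hcg_head]
    simp only [hkeys]
    have hinner : sub.items.foldl (fun m q => m.insert ((pvE D).getD q.1 0) q.2) PySem.Dict.empty
        = PySem.Dict.ofList (sub.items.map (fun q => ((pvE D).getD q.1 0, q.2))) := by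
      show _ = List.foldl (fun (acc : PySem.Dict Int Int) (p : Int × Int) => acc.insert p.1 p.2)
        PySem.Dict.empty (sub.items.map (fun q => ((pvE D).getD q.1 0, q.2)))
      rw [List.foldl_map]
    rw [hinner]
    rw [ih (PySem.Set.update (PySem.Set.add S s) sub.keys) _ hS2 hD2
      (by simpa using (List.nodup_cons.mp (by simpa using hsrc)).2) ?hcg']
    case hcg' =>
      intro p hp j hj
      rw [List.map_append] at hj
      rcases List.mem_append.mp hj with hj1 | hj2
      · exact hcg p (List.mem_cons_of_mem _ hp) j hj1
      · simp only [List.map_cons, List.map_nil, List.mem_singleton] at hj2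
        subst hj2
        have hsD : s ∈ D := hpre1.subset hmem_s
        have hpD : p.1 ∈ D := by
          rw [← hD2]
          refine (PySem.Set.mem_update _ _ _).mpr (Or.inr ?_)
          simp only [pvStream, List.mem_flatMap]
          exact ⟨p, hp, List.mem_cons_self⟩
        intro heq
        have : s = p.1 := pvE_getD_inj hsD hpD heq
        have hnotin : s ∉ rest.map Prod.fst := (List.nodup_cons.mp (by simpa using hsrc)).1
        exact hnotin (this ▸ List.mem_map_of_mem hp)
    rw [List.map_cons]
    simp [List.append_assoc]

-- ===== VERDICT (by name: the statement is the Claim_ definition above) =====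
theorem pvLab_nodup (L : List (String × PySem.Dict String Int))
    (hsrc : (L.map Prod.fst).Nodup) (D : List String)
    (hmem : ∀ p ∈ L, p.1 ∈ D) :
    (L.map (fun p => (pvE D).getD p.1 0)).Nodup := by
  have : L.map (fun p => (pvE D).getD p.1 0)
      = (L.map Prod.fst).map (fun k => (pvE D).getD k 0) := by
    simp [List.map_map, Function.comp]
  rw [this]
  refine List.Nodup.map_on ?_ hsrc
  intro x hx y hy hxy
  simp only [List.mem_map] at hx hy
  obtain ⟨p, hp, rfl⟩ := hx
  obtain ⟨q, hq, rfl⟩ := hy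
  exact pvE_getD_inj (hmem p hp) (hmem q hq) hxy

theorem sanitize_adjacency_list_spec : Claim_equal_sanitize_adjacency_list := by
  intro graph _
  show sanitize_adjacency_list graph = sanitize_adjacency_list_alt graph
  unfold sanitize_adjacency_list sanitize_adjacency_list_alt
  simp only []
  set L := (pvToDict graph).items with hL
  set D := PySem.Set.update [] (pvStream L) with hD
  have hsrc : (L.map Prod.fst).Nodup := PySem.Dict.nodup_keys_ofList _
  have hDnd : D.Nodup := PySem.Set.nodup_update _ _ List.nodup_nil
  have hmem : ∀ p ∈ L, p.1 ∈ D := by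
    intro p hp
    rw [hD]
    refine (PySem.Set.mem_update _ _ _).mpr (Or.inr ?_)
    simp only [pvStream, List.mem_flatMap]
    exact ⟨p, hp, List.mem_cons_self⟩
  have hmain : pvAOuter L PySem.Dict.empty 0 PySem.Dict.empty
      = (pvE D, (D.length : Int),
         ⟨[] ++ L.map (fun p => ((pvE D).getD p.1 0,
            PySem.Dict.ofList (p.2.items.map (fun q => ((pvE D).getD q.1 0, q.2)))))⟩) :=
    pvOuter_spec D hDnd L [] [] List.nodup_nil hD.symm hsrc (by simp)
  have hkti : PySem.Dict.ofList
      ((PySem.List.enumerate (PySem.List.dedup (L.flatMap (fun p => p.1 :: p.2.keys))) 0).map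
        (fun q => (q.2, q.1))) = pvE D := by
    have hdd : PySem.List.dedup (L.flatMap (fun p => p.1 :: p.2.keys)) = D := rfl
    rw [hdd, pv_ofList_eq_mk]
    · rfl
    · rw [List.map_map]
      have hcomp : (Prod.fst ∘ fun (q : Int × String) => (q.2, q.1)) = fun q => q.2 := rfl
      rw [hcomp, PySem.List.map_snd_enumerate]
      exact hDnd
  rw [hmain, hkti]
  have hcg : PySem.Dict.ofList (L.map (fun p => ((pvE D).getD p.1 0,
        PySem.Dict.ofList (p.2.items.map (fun q => ((pvE D).getD q.1 0, q.2))))))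
      = PySem.Dict.mk (L.map (fun p => ((pvE D).getD p.1 0,
        PySem.Dict.ofList (p.2.items.map (fun q => ((pvE D).getD q.1 0, q.2)))))) := by
    apply pv_ofList_eq_mk
    have : (L.map (fun p => ((pvE D).getD p.1 0,
        PySem.Dict.ofList (p.2.items.map (fun q => ((pvE D).getD q.1 0, q.2)))))).map Prod.fst
        = L.map (fun p => (pvE D).getD p.1 0) := by
      simp [List.map_map, Function.comp]
    rw [this]
    exact pvLab_nodup L hsrc D hmem
  rw [hcg]
  rfl
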